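-- pv_equiv track=rewrite | github.com/TFeld00/AdventOfCode | 2024/d17.py | mergeIfValid
-- ===== SOURCE A (Python) =====
-- from itertools import zip_longest
--
-- def mergeIfValid(a,b):
--     s=''
--     valid=1
--     for v,w in zip_longest(a,b,fillvalue='?'):
--         if v==w or '?' in v+w:
--             s+=min(v,w)
--         else:valid=0
--     if valid:
--         return s.rstrip('?')
-- ===== SOURCE B (Python) =====
-- def mergeIfValid(a, b):
--     # Walk from the last position back to the front; bail out immediately on a
--     # conflict, and fuse the trailing-'?' stripping into the build (skip '?'
--     # while nothing has been kept yet).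
--     out = []
--     for i in range(max(len(a), len(b)) - 1, -1, -1):
--         v = a[i] if i < len(a) else '?'
--         w = b[i] if i < len(b) else '?'
--         if v != w and v != '?' and w != '?':
--             return None
--         c = min(v, w)
--         if out or c != '?':
--             out.append(c)
--     return ''.join(reversed(out))
-- ===== Notes on version B (the rewrite author's own statement) =====
-- stated objective: alternative
-- what changed: Replaces A's forward zip_longest pass with a validity flag and a final rstrip('?') by a backward index loop (last position to first) that returns None immediately on the first conflict and fuses the trailing-'?' stripping into the build by skipping '?' while nothing has been kept yet; no zip_longest, no flag, no rstrip.
import Mathlib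
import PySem

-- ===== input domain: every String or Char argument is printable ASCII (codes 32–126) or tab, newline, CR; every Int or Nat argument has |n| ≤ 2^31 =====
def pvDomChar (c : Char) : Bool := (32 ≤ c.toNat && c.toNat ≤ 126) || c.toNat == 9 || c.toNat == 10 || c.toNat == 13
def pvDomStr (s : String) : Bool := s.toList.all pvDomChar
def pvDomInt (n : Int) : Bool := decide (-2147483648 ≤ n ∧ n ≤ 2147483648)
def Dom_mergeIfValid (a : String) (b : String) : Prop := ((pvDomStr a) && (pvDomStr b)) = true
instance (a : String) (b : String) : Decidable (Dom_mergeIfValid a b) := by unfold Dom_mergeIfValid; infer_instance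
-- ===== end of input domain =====

-- B replaces A's forward zip_longest pass with a validity flag and a final rstrip('?')
-- by a backward index loop with an immediate None on conflict, fusing the stripping
-- of trailing '?' into the build (skip '?' while nothing has been kept yet).

-- ===== PORT A =====
-- itertools.zip_longest(a, b, fillvalue='?'), ported by hand, exact
def zipLongestQ : List Char → List Char → List (Char × Char)
  | [], [] => []
  | v :: a, [] => (v, '?') :: zipLongestQ a []
  | [], w :: b => ('?', w) :: zipLongestQ [] b
  | v :: a, w :: b => (v, w) :: zipLongestQ a b

-- str.rstrip('?'), ported by hand, exact
def pyRstripQ (cs : List Char) : List Char := (cs.reverse.dropWhile (· == '?')).reverse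

def mergeIfValid (a : String) (b : String) : Option String :=
  let r := (zipLongestQ a.toList b.toList).foldl
    (fun (st : List Char × Bool) vw =>
      if vw.1 == vw.2 || vw.1 == '?' || vw.2 == '?' then (st.1 ++ [min vw.1 vw.2], st.2)
      else (st.1, false)) ([], true)
  if r.2 then some (String.ofList (pyRstripQ r.1)) else none

-- ===== PORT B =====
-- one iteration of Source B's backward loop; the Option state is none after the early 'return None'
def altStep (la lb : List Char) (st : Option (List Char)) (i : Int) : Option (List Char) :=
  match st with
  | none => none
  | some out =>
    let v : Char := if i < (la.length : Int) then la.getD i.toNat '?' else '?'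
    let w : Char := if i < (lb.length : Int) then lb.getD i.toNat '?' else '?'
    if v != w && v != '?' && w != '?' then none
    else
      let c := min v w
      some (if !out.isEmpty || c != '?' then out ++ [c] else out)

def mergeIfValid_alt (a : String) (b : String) : Option String :=
  match (PySem.List.pyRange ((max a.toList.length b.toList.length : Int) - 1) (-1) (-1)).foldl
      (altStep a.toList b.toList) (some []) with
  | none => none
  | some out => some (String.ofList out.reverse)

-- ===== PRECONDITION & SPEC =====
def Spec_mergeIfValid (a : String) (b : String) (out : Option String) : Prop := out = mergeIfValid_alt a b
instance (a : String) (b : String) (out : Option String) : Decidable (Spec_mergeIfValid a b out) := by unfold Spec_mergeIfValid; infer_instance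

-- ===== CLAIM (what is proved, stated in full; the proofs are below) =====
def Claim_equal_mergeIfValid : Prop := ∀ (a : String) (b : String), Dom_mergeIfValid a b → Spec_mergeIfValid a b (mergeIfValid a b)

-- ===== LEMMAS AND PROOFS =====

def okPair (p : Char × Char) : Bool := p.1 == p.2 || p.1 == '?' || p.2 == '?'

-- B's backward loop, restated as structural recursion on the pair list (head processed last)
def goMerge : List (Char × Char) → Option (List Char)
  | [] => some []
  | p :: rest =>
    match goMerge rest with
    | none => none
    | some r =>
      if p.1 != p.2 && p.1 != '?' && p.2 != '?' then none
      else
        let c := min p.1 p.2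
        some (if !r.isEmpty || c != '?' then c :: r else r)

theorem foldA_eq (pairs : List (Char × Char)) (acc : List Char) (valid : Bool) :
    pairs.foldl
      (fun (st : List Char × Bool) vw =>
        if vw.1 == vw.2 || vw.1 == '?' || vw.2 == '?' then (st.1 ++ [min vw.1 vw.2], st.2)
        else (st.1, false)) (acc, valid)
    = (acc ++ (pairs.filter okPair).map (fun vw => min vw.1 vw.2),
       valid && pairs.all okPair) := by
  induction pairs generalizing acc valid with
  | nil => simp
  | cons vw rest ih =>
    by_cases h : (vw.1 == vw.2 || vw.1 == '?' || vw.2 == '?') = true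
    · rw [List.foldl_cons, if_pos h, ih]
      simp [okPair, h]
    · rw [List.foldl_cons, if_neg h, ih]
      simp [okPair, h]

theorem rstripQ_cons (c : Char) (l : List Char) :
    pyRstripQ (c :: l) =
      if pyRstripQ l = [] then (if c == '?' then [] else [c]) else c :: pyRstripQ l := by
  unfold pyRstripQ
  rw [List.reverse_cons, List.dropWhile_append]
  by_cases h : (l.reverse.dropWhile (· == '?')).isEmpty = true
  · simp only [h, if_true]
    have h' : (l.reverse.dropWhile (· == '?')).reverse = [] := by
      simp [List.isEmpty_iff.mp h]
    rw [if_pos h']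
    by_cases hc : (c == '?') = true
    · simp [List.dropWhile, hc]
    · simp [List.dropWhile, hc]
  · have h' : ¬ (l.reverse.dropWhile (· == '?')).reverse = [] := by
      simp only [List.isEmpty_iff] at h
      simpa using h
    simp [h, h']

theorem goMerge_eq (pairs : List (Char × Char)) :
    goMerge pairs =
      if pairs.all okPair then some (pyRstripQ (pairs.map (fun p => min p.1 p.2))) else none := by
  induction pairs with
  | nil => simp [goMerge, pyRstripQ]
  | cons p rest ih =>
    rw [goMerge, ih]
    by_cases hall : rest.all okPair = true
    · rw [if_pos hall]
      by_cases hp : okPair p = true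
      · have hbad : (p.1 != p.2 && p.1 != '?' && p.2 != '?') = false := by
          simp only [okPair] at hp
          cases h1 : p.1 == p.2 <;> cases h2 : p.1 == '?' <;> cases h3 : p.2 == '?' <;>
            simp_all [bne]
        simp only [hbad, Bool.false_eq_true, if_false, List.all_cons, hp, hall,
          Bool.and_self, if_true, List.map_cons]
        rw [rstripQ_cons]
        by_cases hr : pyRstripQ (rest.map (fun p => min p.1 p.2)) = []
        · by_cases hc : min p.1 p.2 = '?'
          · simp [hr, hc]
          · simp [hr, hc]
        · simp [hr]
      · have hbad : (p.1 != p.2 && p.1 != '?' && p.2 != '?') = true := by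
          simp only [okPair] at hp
          cases h1 : p.1 == p.2 <;> cases h2 : p.1 == '?' <;> cases h3 : p.2 == '?' <;>
            simp_all [bne]
        simp [hbad, hp]
    · simp [hall]

theorem charAt_shift (la : List Char) (i : Int) (hi : 1 ≤ i) :
    (if i < (la.length : Int) then la.getD i.toNat '?' else '?')
      = (if i - 1 < (la.tail.length : Int) then la.tail.getD (i - 1).toNat '?' else '?') := by
  cases la with
  | nil =>
    have h1 : ¬ (i < ((List.length ([] : List Char) : Nat) : Int)) := by simp; omega
    have h2 : ¬ (i - 1 < ((List.length (List.tail ([] : List Char)) : Nat) : Int)) := by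
      simp; omega
    rw [if_neg h1, if_neg h2]
  | cons v la' =>
    simp only [List.length_cons, List.tail_cons]
    by_cases h : i - 1 < (la'.length : Int)
    · have h' : i < ((la'.length : Int) + 1) := by omega
      rw [if_pos (by push_cast; omega), if_pos h]
      have : i.toNat = (i - 1).toNat + 1 := by omega
      rw [this, List.getD_cons_succ]
    · rw [if_neg (by push_cast; omega), if_neg h]

theorem altStep_shift (la lb : List Char) (s : Option (List Char)) (i : Int) (hi : 1 ≤ i) :
    altStep la lb s i = altStep la.tail lb.tail s (i - 1) := by
  cases s with
  | none => rfl
  | some out =>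
    simp only [altStep]
    rw [charAt_shift la i hi, charAt_shift lb i hi]

theorem zipLongestQ_tail (la lb : List Char) (h : ¬ (la = [] ∧ lb = [])) :
    zipLongestQ la lb = (la.headD '?', lb.headD '?') :: zipLongestQ la.tail lb.tail := by
  cases la <;> cases lb <;> simp_all [zipLongestQ]

theorem foldl_ext2 {A B : Type} (f g : A → B → A) (l : List B)
    (h : ∀ s x, x ∈ l → f s x = g s x) : ∀ s, l.foldl f s = l.foldl g s := by
  induction l with
  | nil => intro s; rfl
  | cons x xs ih =>
    intro s
    rw [List.foldl_cons, List.foldl_cons, h s x List.mem_cons_self]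
    exact ih (fun s y hy => h s y (List.mem_cons_of_mem x hy)) _

theorem core_lemma (n : Nat) : ∀ (la lb : List Char), max la.length lb.length = n →
    ((List.range n).map (fun k : Nat => ((n : Int) - 1) - (k : Int))).foldl (altStep la lb) (some [])
      = Option.map List.reverse (goMerge (zipLongestQ la lb)) := by
  induction n with
  | zero =>
    intro la lb h
    have hla : la = [] := List.eq_nil_of_length_eq_zero (by omega)
    have hlb : lb = [] := List.eq_nil_of_length_eq_zero (by omega)
    subst hla; subst hlb
    simp [goMerge, zipLongestQ]
  | succ m ih =>
    intro la lb h
    have hne : ¬ (la = [] ∧ lb = []) := by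
      rintro ⟨h1, h2⟩; subst h1; subst h2; simp at h
    have hmax : max la.tail.length lb.tail.length = m := by
      simp only [List.length_tail] at *
      omega
    rw [List.range_succ, List.map_append, List.foldl_append]
    have hmap : (List.range m).map (fun k : Nat => (((m + 1 : Nat) : Int) - 1) - (k : Int))
        = (List.range m).map (fun k : Nat => ((m : Int) - (k : Int))) := by
      apply List.map_congr_left; intro k _; push_cast; ring
    rw [hmap]
    have hfold : ((List.range m).map (fun k : Nat => ((m : Int) - (k : Int)))).foldl (altStep la lb) (some [])
        = ((List.range m).map (fun k : Nat => (((m : Int)) - 1) - (k : Int))).foldl (altStep la.tail lb.tail) (some []) := by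
      rw [List.foldl_map, List.foldl_map]
      apply foldl_ext2
      intro s k hk
      have hk' : k < m := List.mem_range.mp hk
      rw [altStep_shift la lb s ((m : Int) - k) (by omega)]
      congr 1
      omega
    rw [hfold, ih la.tail lb.tail hmax, zipLongestQ_tail la lb hne]
    -- now peel the final index 0
    have hsimp : (fun k : Nat => (((m + 1 : Nat) : Int) - 1) - (k : Int)) m = (0 : Int) := by
      push_cast; ring
    simp only [List.map_cons, List.map_nil, hsimp, List.foldl_cons, List.foldl_nil]
    cases hX : goMerge (zipLongestQ la.tail lb.tail) with
    | none => simp [goMerge, hX, altStep]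
    | some r =>
      have hv : (if (0 : Int) < (la.length : Int) then la.getD (0 : Int).toNat '?' else '?')
          = la.headD '?' := by
        cases la <;> simp
      have hw : (if (0 : Int) < (lb.length : Int) then lb.getD (0 : Int).toNat '?' else '?')
          = lb.headD '?' := by
        cases lb <;> simp
      simp only [goMerge, hX, altStep, hv, hw, Option.map_some]
      rw [show r.reverse.isEmpty = r.isEmpty from by cases r <;> simp]
      split_ifs <;> simp

theorem alt_closed (a b : String) :
    mergeIfValid_alt a b =
      if (zipLongestQ a.toList b.toList).all okPair then
        some (String.ofList (pyRstripQ ((zipLongestQ a.toList b.toList).map (fun p => min p.1 p.2))))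
      else none := by
  have hrange : PySem.List.pyRange ((((max a.toList.length b.toList.length : Nat) : Int)) - 1) (-1) (-1)
      = (List.range (max a.toList.length b.toList.length)).map
          (fun k : Nat => ((((max a.toList.length b.toList.length : Nat) : Int)) - 1) - (k : Int)) := by
    rw [PySem.List.pyRange_neg_one]
    rw [show (((((max a.toList.length b.toList.length : Nat) : Int)) - 1) - (-1)).toNat
        = max a.toList.length b.toList.length by omega]
  unfold mergeIfValid_alt
  simp only [← Nat.cast_max]
  rw [hrange, core_lemma (max a.toList.length b.toList.length) a.toList b.toList rfl,
    goMerge_eq]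
  by_cases h : (zipLongestQ a.toList b.toList).all okPair = true
  · simp [h]
  · simp [h]

-- ===== VERDICT (by name: the statement is the Claim_ definition above) =====
theorem mergeIfValid_spec : Claim_equal_mergeIfValid := by
  intro a b _
  unfold Spec_mergeIfValid mergeIfValid
  rw [alt_closed]
  simp only [foldA_eq, Bool.true_and, List.nil_append]
  by_cases h : (zipLongestQ a.toList b.toList).all okPair = true
  · simp only [h, if_pos]
    rw [List.filter_eq_self.mpr (fun x hx => List.all_eq_true.mp h x hx)]
  · simp [h]
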